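-- pv_equiv track=rewrite | github.com/michaelkimm/Algorithm-problem-solving-thought-process-re-record | Python/Programmers/ItemGet.py | check_movable_pt
-- ===== SOURCE A (Python) =====
-- def check_movable_pt(rectangles, x, y):
--     for rect in rectangles:
--         if check_pt_in_rectangle(rect, x, y):
--             return False
--     for rect in rectangles:
--         if check_pt_on_rect_border(rect, x ,y):
--             return True
--     return False
--
-- def check_pt_on_rect_border(rectangle, x, y):
--     # 모든 직사각형의 내부에 있으면 안됨 and 1개 이상의 직사각형의 border에 있어야함.
--     p = (x, y)
--     bl = (rectangle[0], rectangle[1])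
--     tr = (rectangle[2], rectangle[3])
--     is_in_on_rect = p[0] >= bl[0] and p[0] <= tr[0] and p[1] >= bl[1] and p[1] <= tr[1]
--     is_in_rect = check_pt_in_rectangle(rectangle, x, y)
--     return is_in_rect == False and is_in_on_rect
--
-- def check_pt_in_rectangle(rectangle, x, y):
--     p = (x, y)
--     bl = (rectangle[0], rectangle[1])
--     tr = (rectangle[2], rectangle[3])
--     return p[0] > bl[0] and p[0] < tr[0] and p[1] > bl[1] and p[1] < tr[1]
-- ===== SOURCE B (Python) =====
-- def check_movable_pt(rectangles, x, y):
--     found_border = False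
--     for r in rectangles:
--         x1, y1, x2, y2 = r[0], r[1], r[2], r[3]
--         if x1 < x < x2 and y1 < y < y2:
--             return False
--         if x1 <= x <= x2 and y1 <= y <= y2:
--             found_border = True
--     return found_border
-- ===== Notes on version B (the rewrite author's own statement) =====
-- stated objective: simpler
-- what changed: Fuses A's two sequential passes (inside-check pass, then border-check pass) and its two helper functions into one loop that early-returns False on a strictly-containing rectangle and otherwise accumulates a found_border flag.
-- outside the precondition, e.g. on check_movable_pt([[0, 0, 2, 2], [5]], 1, 1): A returns False, B returns False
import Mathlib
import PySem

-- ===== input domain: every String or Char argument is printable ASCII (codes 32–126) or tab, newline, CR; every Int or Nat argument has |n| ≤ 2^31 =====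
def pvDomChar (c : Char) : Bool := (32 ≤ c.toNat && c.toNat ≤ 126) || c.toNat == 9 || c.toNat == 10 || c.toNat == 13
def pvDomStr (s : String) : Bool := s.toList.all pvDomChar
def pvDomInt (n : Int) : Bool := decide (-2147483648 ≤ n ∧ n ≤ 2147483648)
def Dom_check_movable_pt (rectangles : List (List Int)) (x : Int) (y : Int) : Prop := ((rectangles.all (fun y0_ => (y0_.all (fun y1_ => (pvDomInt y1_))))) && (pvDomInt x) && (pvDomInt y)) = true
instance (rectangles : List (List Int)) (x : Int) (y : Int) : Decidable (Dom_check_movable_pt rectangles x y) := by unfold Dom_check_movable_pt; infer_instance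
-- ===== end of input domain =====

-- B fuses A's two sequential passes and two helpers into one loop with a found_border flag (objective: simpler).

-- ===== PORT A =====
-- rectangle[i]; Pre_ guarantees the index is in range, so the .getD 0 default is never used
def pvGetZ (r : List Int) (i : Int) : Int := (PySem.List.pyGet? r i).getD 0

def pvInRect (rect : List Int) (x y : Int) : Bool :=
  let bl0 := pvGetZ rect 0
  let bl1 := pvGetZ rect 1
  let tr0 := pvGetZ rect 2
  let tr1 := pvGetZ rect 3
  bl0 < x && x < tr0 && bl1 < y && y < tr1

def pvOnBorder (rect : List Int) (x y : Int) : Bool :=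
  let bl0 := pvGetZ rect 0
  let bl1 := pvGetZ rect 1
  let tr0 := pvGetZ rect 2
  let tr1 := pvGetZ rect 3
  let is_in_on_rect := bl0 ≤ x && x ≤ tr0 && bl1 ≤ y && y ≤ tr1
  let is_in_rect := pvInRect rect x y
  (is_in_rect == false) && is_in_on_rect

-- first loop: early-returns False on a strictly containing rectangle
def pvPass1 (rectangles : List (List Int)) (x y : Int) : Bool :=
  match rectangles with
  | [] => false
  | r :: rs => if pvInRect r x y then true else pvPass1 rs x y

-- second loop: early-returns True on a border rectangle
def pvPass2 (rectangles : List (List Int)) (x y : Int) : Bool :=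
  match rectangles with
  | [] => false
  | r :: rs => if pvOnBorder r x y then true else pvPass2 rs x y

def check_movable_pt (rectangles : List (List Int)) (x : Int) (y : Int) : Bool :=
  if pvPass1 rectangles x y then false
  else if pvPass2 rectangles x y then true
  else false

-- ===== PORT B =====
def pvAltLoop (rectangles : List (List Int)) (x y : Int) (found : Bool) : Bool :=
  match rectangles with
  | [] => found
  | r :: rs =>
    let x1 := pvGetZ r 0
    let y1 := pvGetZ r 1
    let x2 := pvGetZ r 2
    let y2 := pvGetZ r 3
    if x1 < x && x < x2 && y1 < y && y < y2 then false
    else pvAltLoop rs x y (found || (x1 ≤ x && x ≤ x2 && y1 ≤ y && y ≤ y2))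

def check_movable_pt_alt (rectangles : List (List Int)) (x : Int) (y : Int) : Bool :=
  pvAltLoop rectangles x y false

-- ===== PRECONDITION & SPEC =====
-- Pre_ excludes inputs containing a rectangle with fewer than 4 entries, on which A's
-- indexing rectangle[3] generally raises IndexError (A only returns on such inputs when an
-- earlier rectangle strictly contains the point, in which case B returns the same False).
def Pre_check_movable_pt (rectangles : List (List Int)) (x : Int) (y : Int) : Prop :=
  ∀ r ∈ rectangles, 4 ≤ r.length
instance (rectangles : List (List Int)) (x : Int) (y : Int) : Decidable (Pre_check_movable_pt rectangles x y) := by unfold Pre_check_movable_pt; infer_instance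

def pvWitness_check_movable_pt : List (List Int) × Int × Int := ([[0, 0, 2, 2]], 0, 1)

def Spec_check_movable_pt (rectangles : List (List Int)) (x : Int) (y : Int) (out : Bool) : Prop := out = check_movable_pt_alt rectangles x y
instance (rectangles : List (List Int)) (x : Int) (y : Int) (out : Bool) : Decidable (Spec_check_movable_pt rectangles x y out) := by unfold Spec_check_movable_pt; infer_instance

-- ===== CLAIM (what is proved, stated in full; the proofs are below) =====
def Claim_equal_check_movable_pt : Prop := ∀ (rectangles : List (List Int)) (x : Int) (y : Int), Dom_check_movable_pt rectangles x y → Pre_check_movable_pt rectangles x y → Spec_check_movable_pt rectangles x y (check_movable_pt rectangles x y)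

-- ===== LEMMAS AND PROOFS =====
-- B's single loop equals: "if pass 1 fires then False, else found OR pass 2".
lemma pvAltLoop_eq (rectangles : List (List Int)) (x y : Int) (found : Bool) :
    pvAltLoop rectangles x y found =
      if pvPass1 rectangles x y then false else (found || pvPass2 rectangles x y) := by
  induction rectangles generalizing found with
  | nil => simp [pvAltLoop, pvPass1, pvPass2]
  | cons r rs ih =>
    by_cases h : pvInRect r x y
    · simp [pvAltLoop, pvPass1, pvInRect] at h ⊢
      simp [h]
    · have hb : pvOnBorder r x y =
          (pvGetZ r 0 ≤ x && x ≤ pvGetZ r 2 && pvGetZ r 1 ≤ y && y ≤ pvGetZ r 3) := by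
        simp [pvOnBorder, pvInRect] at h ⊢
        omega
      simp only [pvAltLoop, pvPass1, pvPass2, hb]
      rw [if_neg (by simpa [pvInRect] using h), if_neg h, ih]
      by_cases h1 : pvPass1 rs x y
      · simp [h1]
      · simp [h1, Bool.or_assoc]

-- ===== VERDICT (by name: the statement is the Claim_ definition above) =====
theorem check_movable_pt_spec : Claim_equal_check_movable_pt := by
  intro rectangles x y _ _
  unfold Spec_check_movable_pt check_movable_pt check_movable_pt_alt
  rw [pvAltLoop_eq]
  by_cases h1 : pvPass1 rectangles x y
  · simp [h1]
  · by_cases h2 : pvPass2 rectangles x y <;> simp [h1, h2]
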